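-- pv_equiv track=rewrite | github.com/antocreadev/Ateliers-L3SINF | 5/matrice.py | where_perso_recursive
-- ===== SOURCE A (Python) =====
-- def where_perso_recursive(arr, searched, i=0, k=0, result=None):
--     if result is None:
--         result = []
--     if i < len(arr):
--         if k < len(arr[i]):
--             if searched == arr[i][k]:
--                 result.append((i, k))
--             where_perso_recursive(arr, searched, i, k + 1, result)
--         else:
--             where_perso_recursive(arr, searched, i + 1, 0, result)
--     return result
-- ===== SOURCE B (Python) =====
-- def where_perso_recursive(arr, searched, i=0, k=0, result=None):
--     if result is None:
--         result = []
--     if i < len(arr):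
--         row = arr[i]
--         result.extend((i, j) for j in range(k, len(row)) if row[j] == searched)
--         result.extend((r, j) for r in range(i + 1, len(arr))
--                       for j, v in enumerate(arr[r]) if v == searched)
--     return result
-- ===== Notes on version B (the rewrite author's own statement) =====
-- stated objective: simpler
-- what changed: Replaces A's self-recursion that threads (i, k, result) one cell per call by two flat comprehension passes: one over range(k, len(arr[i])) for the tail of the starting row, one over the remaining rows with enumerate.
import Mathlib
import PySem

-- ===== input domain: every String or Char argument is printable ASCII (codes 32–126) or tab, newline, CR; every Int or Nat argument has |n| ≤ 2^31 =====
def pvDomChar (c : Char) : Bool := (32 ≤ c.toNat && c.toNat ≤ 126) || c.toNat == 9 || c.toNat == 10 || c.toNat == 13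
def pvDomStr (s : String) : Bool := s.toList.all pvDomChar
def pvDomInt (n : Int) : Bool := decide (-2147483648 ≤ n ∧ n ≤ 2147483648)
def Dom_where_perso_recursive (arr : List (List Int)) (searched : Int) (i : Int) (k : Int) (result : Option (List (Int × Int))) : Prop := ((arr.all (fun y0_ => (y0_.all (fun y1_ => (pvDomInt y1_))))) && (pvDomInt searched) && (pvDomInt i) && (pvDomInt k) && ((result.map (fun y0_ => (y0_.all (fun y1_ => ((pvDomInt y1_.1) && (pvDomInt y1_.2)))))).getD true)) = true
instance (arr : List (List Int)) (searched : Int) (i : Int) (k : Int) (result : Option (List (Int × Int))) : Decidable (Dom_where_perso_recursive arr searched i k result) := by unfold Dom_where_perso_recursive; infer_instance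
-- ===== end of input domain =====

-- B replaces A's state-threading recursion by two flat comprehension passes (tail of the
-- starting row, then the remaining rows); objective: simpler.  Python A and B both mutate the
-- caller-supplied result list; the equivalence proved here is about the RETURN value.

-- ===== PORT A =====
-- literal transliteration of A's recursion; the recursive state (i, k, result) is threaded as is
def whereGoA (arr : List (List Int)) (searched : Int) (i : Int) (k : Int) (res : List (Int × Int)) : List (Int × Int) :=
  if _h : i < (arr.length : Int) then
    -- arr[i] is (PySem.List.pyGet? arr i).getD []; none = IndexError, excluded by Pre_
    if _hk : k < ((((PySem.List.pyGet? arr i).getD []).length : Int)) then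
      let res' := match PySem.List.pyGet? ((PySem.List.pyGet? arr i).getD []) k with
        | some v => if searched = v then res ++ [(i, k)] else res
        | none => res                               -- IndexError in Python, excluded by Pre_
      whereGoA arr searched i (k + 1) res'
    else whereGoA arr searched (i + 1) 0 res
  else res
termination_by (((arr.length : Int) - i).toNat,
                ((((PySem.List.pyGet? arr i).getD []).length : Int) - k).toNat)
decreasing_by
  · apply Prod.Lex.right
    omega
  · apply Prod.Lex.left
    omega

def where_perso_recursive (arr : List (List Int)) (searched : Int) (i : Int) (k : Int) (result : Option (List (Int × Int))) : List (Int × Int) :=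
  whereGoA arr searched i k (result.getD [])

-- ===== PORT B =====
def where_perso_recursive_alt (arr : List (List Int)) (searched : Int) (i : Int) (k : Int) (result : Option (List (Int × Int))) : List (Int × Int) :=
  let res := result.getD []
  if i < (arr.length : Int) then
    let row := (PySem.List.pyGet? arr i).getD []   -- arr[i]; none = IndexError, excluded by Pre_
    -- (i, j) for j in range(k, len(row)) if row[j] == searched
    let part1 := (PySem.List.pyRange k row.length 1).filterMap
      (fun j => if PySem.List.pyGetD row j 0 = searched then some ((i, j) : Int × Int) else none)
    -- (r, j) for r in range(i+1, len(arr)) for j, v in enumerate(arr[r]) if v == searched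
    let part2 := (PySem.List.pyRange (i + 1) arr.length 1).flatMap
      (fun r => (PySem.List.enumerate ((PySem.List.pyGet? arr r).getD []) 0).filterMap
        (fun p => if p.2 = searched then some ((r, p.1) : Int × Int) else none))
    res ++ part1 ++ part2
  else res

-- ===== PRECONDITION & SPEC =====
-- Pre_ excludes exactly the inputs where Python A raises IndexError: a starting row index below
-- -len(arr), or a starting column index below -len(arr[i]).
def Pre_where_perso_recursive (arr : List (List Int)) (searched : Int) (i : Int) (k : Int) (result : Option (List (Int × Int))) : Prop :=
  i < (arr.length : Int) →
    (-(arr.length : Int) ≤ i ∧ -((((PySem.List.pyGet? arr i).getD []).length : Int)) ≤ k)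
instance (arr : List (List Int)) (searched : Int) (i : Int) (k : Int) (result : Option (List (Int × Int))) : Decidable (Pre_where_perso_recursive arr searched i k result) := by unfold Pre_where_perso_recursive; infer_instance

def pvWitness_where_perso_recursive : List (List Int) × Int × Int × Int × (Option (List (Int × Int))) :=
  ([[1, 2], [2, 1]], 2, 0, 0, none)

def Spec_where_perso_recursive (arr : List (List Int)) (searched : Int) (i : Int) (k : Int) (result : Option (List (Int × Int))) (out : List (Int × Int)) : Prop := out = where_perso_recursive_alt arr searched i k result
instance (arr : List (List Int)) (searched : Int) (i : Int) (k : Int) (result : Option (List (Int × Int))) (out : List (Int × Int)) : Decidable (Spec_where_perso_recursive arr searched i k result out) := by unfold Spec_where_perso_recursive; infer_instance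

-- ===== CLAIM (what is proved, stated in full; the proofs are below) =====
def Claim_equal_where_perso_recursive : Prop := ∀ (arr : List (List Int)) (searched : Int) (i : Int) (k : Int) (result : Option (List (Int × Int))), Dom_where_perso_recursive arr searched i k result → Pre_where_perso_recursive arr searched i k result → Spec_where_perso_recursive arr searched i k result (where_perso_recursive arr searched i k result)

-- ===== LEMMAS AND PROOFS =====

lemma pvInRange_of_pyGet?_eq_some {α : Type} {xs : List α} {i : Int} {x : α}
    (h : PySem.List.pyGet? xs i = some x) : -(xs.length : Int) ≤ i ∧ i < (xs.length : Int) := by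
  by_contra hc
  have h2 : ¬ PySem.Raise.InRange xs.length i := by
    simp [PySem.Raise.InRange]; omega
  rw [← PySem.List.pyGet?_eq_none_iff] at h2
  simp [h] at h2

lemma pvPyGet?_eq_some {α : Type} {xs : List α} {i : Int}
    (h1 : -(xs.length : Int) ≤ i) (h2 : i < (xs.length : Int)) :
    ∃ x, PySem.List.pyGet? xs i = some x := by
  cases hv : PySem.List.pyGet? xs i with
  | none =>
    rw [PySem.List.pyGet?_eq_none_iff] at hv
    exact absurd (by simp [PySem.Raise.InRange]; omega) hv
  | some x => exact ⟨x, rfl⟩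

-- one step of whereGoA when the current row is exhausted
lemma pvRowDone (arr : List (List Int)) (searched i k : Int) (row : List Int)
    (res : List (Int × Int))
    (hi : PySem.List.pyGet? arr i = some row) (hk : (row.length : Int) ≤ k) :
    whereGoA arr searched i k res = whereGoA arr searched (i + 1) 0 res := by
  have hiR := pvInRange_of_pyGet?_eq_some hi
  rw [whereGoA]
  rw [dif_pos hiR.2, dif_neg (by simp [hi]; omega)]

-- scanning one row: whereGoA from column k equals one filterMap pass over range(k, len(row))
lemma pvRowScan (arr : List (List Int)) (searched i : Int) (row : List Int)
    (hi : PySem.List.pyGet? arr i = some row) :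
    ∀ (n : Nat) (k : Int) (res : List (Int × Int)),
      -(row.length : Int) ≤ k → (row.length : Int) ≤ k + n →
      whereGoA arr searched i k res =
        whereGoA arr searched (i + 1) 0
          (res ++ (PySem.List.pyRange k row.length 1).filterMap
            (fun j => if PySem.List.pyGetD row j 0 = searched then some ((i, j) : Int × Int) else none)) := by
  have hiR := pvInRange_of_pyGet?_eq_some hi
  intro n
  induction n with
  | zero =>
    intro k res hk hb
    rw [PySem.List.pyRange_one_eq_nil (by omega)]
    simpa using pvRowDone arr searched i k row res hi (by omega)
  | succ n ih =>
    intro k res hk hb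
    by_cases hkl : k < (row.length : Int)
    · obtain ⟨v, hv⟩ := pvPyGet?_eq_some (xs := row) (i := k) hk hkl
      have hstep : whereGoA arr searched i k res =
          whereGoA arr searched i (k + 1)
            (if searched = v then res ++ [(i, k)] else res) := by
        rw [whereGoA]
        rw [dif_pos hiR.2, dif_pos (by simp [hi]; omega)]
        simp only [hi, Option.getD_some, hv]
      have hgd : PySem.List.pyGetD row k 0 = v := by
        simp [show PySem.List.pyGetD row k (0 : Int) = (PySem.List.pyGet? row k).getD 0 from rfl, hv]
      rw [hstep, ih (k + 1) _ (by omega) (by omega)]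
      congr 1
      rw [PySem.List.pyRange_one_cons hkl, List.filterMap_cons, hgd]
      by_cases hsv : searched = v
      · simp [hsv]
      · rw [if_neg (show ¬ v = searched from fun h => hsv h.symm)]
        simp [hsv]
    · rw [PySem.List.pyRange_one_eq_nil (by omega)]
      simpa using pvRowDone arr searched i k row res hi (by omega)

-- scanning all rows from i with k = 0 equals the flatMap pass over range(i, len(arr))
lemma pvAllScan (arr : List (List Int)) (searched : Int) :
    ∀ (n : Nat) (i : Int) (res : List (Int × Int)),
      -(arr.length : Int) ≤ i → (arr.length : Int) ≤ i + n →
      whereGoA arr searched i 0 res =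
        res ++ (PySem.List.pyRange i arr.length 1).flatMap
          (fun r => (PySem.List.enumerate ((PySem.List.pyGet? arr r).getD []) 0).filterMap
            (fun p => if p.2 = searched then some ((r, p.1) : Int × Int) else none)) := by
  intro n
  induction n with
  | zero =>
    intro i res h1 h2
    rw [PySem.List.pyRange_one_eq_nil (by omega)]
    rw [whereGoA, dif_neg (by omega)]
    simp
  | succ n ih =>
    intro i res h1 h2
    by_cases hil : i < (arr.length : Int)
    · obtain ⟨row, hv⟩ := pvPyGet?_eq_some (xs := arr) (i := i) h1 hil
      rw [pvRowScan arr searched i row hv row.length 0 res (by omega) (by omega)]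
      rw [ih (i + 1) _ (by omega) (by omega)]
      rw [PySem.List.pyRange_one_cons hil, List.flatMap_cons, hv]
      simp only [Option.getD_some]
      rw [PySem.List.enumerate_eq_map_pyRange (d := 0) row, List.filterMap_map]
      simp [Function.comp, List.append_assoc]
    · rw [PySem.List.pyRange_one_eq_nil (by omega)]
      rw [whereGoA, dif_neg hil]
      simp

-- ===== VERDICT (by name: the statement is the Claim_ definition above) =====
theorem where_perso_recursive_spec : Claim_equal_where_perso_recursive := by
  intro arr searched i k result _dom hpre
  unfold Spec_where_perso_recursive where_perso_recursive where_perso_recursive_alt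
  by_cases hil : i < (arr.length : Int)
  · obtain ⟨h1, h2⟩ := hpre hil
    obtain ⟨row, hv⟩ := pvPyGet?_eq_some (xs := arr) (i := i) h1 hil
    have hkb : -(row.length : Int) ≤ k := by
      have := h2; rw [hv] at this; simpa using this
    rw [pvRowScan arr searched i row hv (row.length - k).toNat k (result.getD [])
        hkb (by omega)]
    rw [pvAllScan arr searched (arr.length - (i + 1)).toNat (i + 1) _ (by omega) (by omega)]
    simp only [if_pos hil, hv, Option.getD_some, List.append_assoc]
  · rw [whereGoA, dif_neg hil, if_neg hil]
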